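-- pv_equiv track=rewrite | github.com/MrBrantCode/unitest_baseline | mut_generate/mist_train_cf/cf_61149/solution.py | fibonacci_product
-- ===== SOURCE A (Python) =====
-- def fibonacci_product(start, end):
--     fib_numbers = [0, 1]
--     for i in range(2, end+1):
--         fib_numbers.append(fib_numbers[i-1] + fib_numbers[i-2])
--     product = 1
--     for i in range(start, end+1):
--         product *= fib_numbers[i]
--     return product
-- ===== SOURCE B (Python) =====
-- def _fib_pair(n):
--     # fast doubling: returns (F(n), F(n+1))
--     if n == 0:
--         return (0, 1)
--     a, b = _fib_pair(n >> 1)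
--     c = a * (2 * b - a)
--     d = a * a + b * b
--     if n & 1:
--         return (d, c + d)
--     return (c, d)
--
--
-- def fibonacci_product(start, end):
--     product = 1
--     for i in range(start, end + 1):
--         product *= _fib_pair(i)[0]
--     return product
-- ===== Notes on version B (the rewrite author's own statement) =====
-- stated objective: alternative
-- what changed: B discards A's bottom-up Fibonacci table and second indexing pass: it computes each F(i) independently by recursive fast doubling on the bits of i (F(2k), F(2k+1) from (F(k),F(k+1))) and folds the product over the range.
-- outside the precondition, e.g. on fibonacci_product(-2, -1): A returns 0, B raises RecursionError; on fibonacci_product(-1, 2): A returns 0, B raises RecursionError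
import Mathlib
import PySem

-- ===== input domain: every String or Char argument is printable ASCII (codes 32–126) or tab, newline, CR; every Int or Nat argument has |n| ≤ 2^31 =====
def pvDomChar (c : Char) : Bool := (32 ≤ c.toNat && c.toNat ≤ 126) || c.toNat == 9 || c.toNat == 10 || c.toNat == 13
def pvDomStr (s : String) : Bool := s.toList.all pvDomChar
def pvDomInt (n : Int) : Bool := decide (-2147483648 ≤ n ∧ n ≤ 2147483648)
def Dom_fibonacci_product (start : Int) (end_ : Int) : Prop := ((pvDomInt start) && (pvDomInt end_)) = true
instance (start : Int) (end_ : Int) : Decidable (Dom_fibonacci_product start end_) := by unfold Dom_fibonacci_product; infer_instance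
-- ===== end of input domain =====

-- B replaces A's bottom-up Fibonacci table + second indexing pass by recursive fast doubling:
-- each F(i) is computed independently from the bits of i and multiplied into the product.

-- ===== PORT A =====
-- A-side helpers: the two loop bodies of the Python, as named step functions
def pvBuildA (xs : List Int) (i : Int) : List Int :=
  xs ++ [PySem.List.pyGetD xs (i - 1) 0 + PySem.List.pyGetD xs (i - 2) 0]

def pvMulA (fib_numbers : List Int) (product : Int) (i : Int) : Int :=
  product * PySem.List.pyGetD fib_numbers i 0

def fibonacci_product (start : Int) (end_ : Int) : Int :=
  let fib_numbers := (PySem.List.pyRange 2 (end_ + 1) 1).foldl pvBuildA [0, 1]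
  (PySem.List.pyRange start (end_ + 1) 1).foldl (pvMulA fib_numbers) 1

-- ===== PORT B =====
-- B-side helper: fast doubling, (F(n), F(n+1)).  B's Python recurses on n >> 1, which for
-- n ≥ 0 is n / 2; on negative n B's Python never returns (outside Pre_), so the port takes Nat.
def pvFibPair : Nat → Int × Int
  | 0 => (0, 1)
  | n + 1 =>
    let p := pvFibPair ((n + 1) / 2)
    let c := p.1 * (2 * p.2 - p.1)
    let d := p.1 * p.1 + p.2 * p.2
    if (n + 1) % 2 = 1 then (d, c + d) else (c, d)
decreasing_by exact Nat.div_lt_self (Nat.succ_pos n) (by norm_num)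

def fibonacci_product_alt (start : Int) (end_ : Int) : Int :=
  (PySem.List.pyRange start (end_ + 1) 1).foldl
    (fun product i => product * (pvFibPair i.toNat).1) 1

-- ===== PRECONDITION & SPEC =====
-- Pre_ excludes negative start with start ≤ end_, the only inputs where A's list indexing goes
-- negative: there A either raises IndexError or returns a value produced by Python's
-- negative-index wraparound into its table, an artefact outside the function's natural domain
-- (B's fast doubling does not terminate there).
def Pre_fibonacci_product (start : Int) (end_ : Int) : Prop := 0 ≤ start ∨ end_ < start
instance (start : Int) (end_ : Int) : Decidable (Pre_fibonacci_product start end_) := by unfold Pre_fibonacci_product; infer_instance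
def pvWitness_fibonacci_product : Int × Int := (2, 7)

def Spec_fibonacci_product (start : Int) (end_ : Int) (out : Int) : Prop := out = fibonacci_product_alt start end_
instance (start : Int) (end_ : Int) (out : Int) : Decidable (Spec_fibonacci_product start end_ out) := by unfold Spec_fibonacci_product; infer_instance

-- ===== CLAIM (what is proved, stated in full; the proofs are below) =====
def Claim_equal_fibonacci_product : Prop := ∀ (start : Int) (end_ : Int), Dom_fibonacci_product start end_ → Pre_fibonacci_product start end_ → Spec_fibonacci_product start end_ (fibonacci_product start end_)

-- ===== LEMMAS AND PROOFS =====

-- mathematical Fibonacci, the common reference of both ports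
def pvFib : Nat → Int
  | 0 => 0
  | 1 => 1
  | n + 2 => pvFib n + pvFib (n + 1)

lemma pvFib_eq (n : Nat) : pvFib n = (Nat.fib n : Int) := by
  induction n using Nat.strong_induction_on with
  | _ n ih =>
    match n with
    | 0 => simp [pvFib]
    | 1 => simp [pvFib]
    | m + 2 =>
      rw [pvFib, Nat.fib_add_two, ih m (by omega), ih (m + 1) (by omega)]
      push_cast; ring

-- fast doubling computes the Fibonacci pair
lemma pvFibPair_eq (n : Nat) : pvFibPair n = ((Nat.fib n : Int), (Nat.fib (n + 1) : Int)) := by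
  induction n using Nat.strong_induction_on with
  | _ n ih =>
    match n with
    | 0 => simp [pvFibPair]
    | m + 1 =>
      rw [pvFibPair, ih ((m + 1) / 2) (by omega)]
      obtain ⟨k, hk⟩ : ∃ k, (m + 1) / 2 = k := ⟨_, rfl⟩
      rw [hk]
      have hle : Nat.fib k ≤ 2 * Nat.fib (k + 1) :=
        le_trans (Nat.fib_le_fib_succ) (by omega)
      have h2k : (Nat.fib (2 * k) : Int)
          = (Nat.fib k : Int) * (2 * (Nat.fib (k + 1) : Int) - (Nat.fib k : Int)) := by
        rw [Nat.fib_two_mul]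
        push_cast [Int.natCast_sub hle]
        ring
      have h2k1 : (Nat.fib (2 * k + 1) : Int)
          = (Nat.fib k : Int) * (Nat.fib k) + (Nat.fib (k + 1) : Int) * (Nat.fib (k + 1)) := by
        rw [Nat.fib_two_mul_add_one]
        push_cast; ring
      by_cases hpar : (m + 1) % 2 = 1
      · have he : m + 1 = 2 * k + 1 := by omega
        rw [if_pos hpar]
        refine Prod.ext ?_ ?_
        · show _ = (Nat.fib (m + 1) : Int)
          rw [he, h2k1]
        · show _ = (Nat.fib (m + 1 + 1) : Int)
          have he2 : m + 1 + 1 = 2 * k + 1 + 1 := by omega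
          rw [he2, Nat.fib_add_two]
          push_cast [h2k, h2k1]; ring
      · have he : m + 1 = 2 * k := by omega
        rw [if_neg hpar]
        refine Prod.ext ?_ ?_
        · show _ = (Nat.fib (m + 1) : Int)
          rw [he, h2k]
        · show _ = (Nat.fib (m + 1 + 1) : Int)
          have he2 : m + 1 + 1 = 2 * k + 1 := by omega
          rw [he2, h2k1]

lemma pvFibPair_fst (n : Nat) : (pvFibPair n).1 = pvFib n := by
  rw [pvFibPair_eq, pvFib_eq]

-- A's table is the Fibonacci sequence
lemma pvBuild_eq (n : Nat) :
    (PySem.List.pyRange 2 ((n : Int) + 1) 1).foldl pvBuildA [0, 1]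
      = (List.range (max (n + 1) 2)).map pvFib := by
  induction n with
  | zero => decide
  | succ m ih =>
    by_cases hm : 1 ≤ m
    · have h2 : (2 : Int) ≤ (m : Int) + 1 := by omega
      rw [show ((m + 1 : Nat) : Int) + 1 = ((m : Int) + 1) + 1 by push_cast; ring,
          PySem.List.pyRange_one_succ_right h2, List.foldl_append, ih]
      have hmax : max (m + 1) 2 = m + 1 := by omega
      have hmax2 : max (m + 1 + 1) 2 = m + 2 := by omega
      rw [hmax, hmax2]
      simp only [List.foldl_cons, List.foldl_nil, pvBuildA]
      have e1 : (m : Int) + 1 - 1 = ((m : Nat) : Int) := by omega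
      have e2 : (m : Int) + 1 - 2 = (((m - 1 : Nat) : Nat) : Int) := by omega
      rw [e1, e2, PySem.List.pyGetD_natCast, PySem.List.pyGetD_natCast]
      have g1 : ((List.range (m + 1)).map pvFib).getD m 0 = pvFib m := by
        simp [List.getD_eq_getElem?_getD]
      have g2 : ((List.range (m + 1)).map pvFib).getD (m - 1) 0 = pvFib (m - 1) := by
        have : m - 1 < m + 1 := by omega
        simp [List.getD_eq_getElem?_getD, this]
      rw [g1, g2]
      have hfib : pvFib m + pvFib (m - 1) = pvFib (m + 1) := by
        obtain ⟨k, rfl⟩ : ∃ k, m = k + 1 := ⟨m - 1, by omega⟩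
        simp [pvFib, add_comm]
      rw [hfib, List.range_succ (n := m + 1), List.map_append]
      rfl
    · interval_cases m
      decide

-- A's second loop multiplies exactly the Fibonacci values, for nonnegative start
lemma pvA_eq (start : Int) (h0 : 0 ≤ start) (n : Nat) :
    fibonacci_product start (n : Int)
      = (PySem.List.pyRange start ((n : Int) + 1) 1).foldl (fun p i => p * pvFib i.toNat) 1 := by
  unfold fibonacci_product
  rw [pvBuild_eq n]
  apply PySem.List.foldl_congr_mem
  intro acc x hx
  have hx' := (PySem.List.mem_pyRange_one).1 hx
  unfold pvMulA
  have hge : 0 ≤ x := le_trans h0 hx'.1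
  have hxe : x = ((x.toNat : Nat) : Int) := by omega
  rw [hxe, PySem.List.pyGetD_natCast]
  have hlt : x.toNat < max (n + 1) 2 := by omega
  simp only [List.getD_eq_getElem?_getD, List.getElem?_map, List.getElem?_range, hlt,
    Option.map_some, Option.getD_some, Int.toNat_natCast]

-- B's fold is the same Fibonacci product
lemma pvB_eq (start : Int) (end_ : Int) :
    fibonacci_product_alt start end_
      = (PySem.List.pyRange start (end_ + 1) 1).foldl (fun p i => p * pvFib i.toNat) 1 := by
  unfold fibonacci_product_alt
  simp only [pvFibPair_fst]

-- ===== VERDICT (by name: the statement is the Claim_ definition above) =====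
theorem fibonacci_product_spec : Claim_equal_fibonacci_product := by
  intro start end_ hdom hpre
  unfold Spec_fibonacci_product
  by_cases hlt : end_ < start
  · -- empty product range on both sides
    unfold fibonacci_product fibonacci_product_alt
    rw [PySem.List.pyRange_one_eq_nil (by omega : end_ + 1 ≤ start)]
    rfl
  · have h0 : 0 ≤ start := by
      rcases hpre with h | h
      · exact h
      · exact absurd h hlt
    have hn : end_ = ((end_.toNat : Nat) : Int) := by omega
    rw [hn, pvA_eq start h0 end_.toNat, pvB_eq]
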